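-- pv_equiv track=rewrite | github.com/FeliciaLa/ExpertA | backend/api/services_old.py | _simulate_emotional_state
-- ===== SOURCE A (Python) =====
-- def _simulate_emotional_state(triggers):
--     """Determine emotional response based on triggers and personality"""
--     if not triggers:
--         return 'neutral'
--
--     # Map common triggers to emotional states
--     if any('money' in trigger or 'financial' in trigger for trigger in triggers):
--         return 'anxious'
--     elif any('social' in trigger or 'rejection' in trigger for trigger in triggers):
--         return 'conflicted'
--     elif any('family' in trigger or 'approval' in trigger for trigger in triggers):
--         return 'motivated'
--     else:
--         return 'engaged'
-- ===== SOURCE B (Python) =====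
-- RULES = (
--     ('anxious', ('money', 'financial')),
--     ('conflicted', ('social', 'rejection')),
--     ('motivated', ('family', 'approval')),
-- )
--
-- def _simulate_emotional_state(triggers):
--     """Determine emotional response based on triggers and personality"""
--     matched = set()
--     for trigger in triggers:
--         for label, keywords in RULES:
--             if any(kw in trigger for kw in keywords):
--                 matched.add(label)
--     if not triggers:
--         return 'neutral'
--     for label in ('anxious', 'conflicted', 'motivated'):
--         if label in matched:
--             return label
--     return 'engaged'
-- ===== Notes on version B (the rewrite author's own statement) =====
-- stated objective: alternative
-- what changed: Replaces A's three separate any() scans (up to three passes over triggers) with a single pass that collects matched category labels in a set via a rule table, then resolves the result by scanning the priority tuple.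
import Mathlib
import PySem

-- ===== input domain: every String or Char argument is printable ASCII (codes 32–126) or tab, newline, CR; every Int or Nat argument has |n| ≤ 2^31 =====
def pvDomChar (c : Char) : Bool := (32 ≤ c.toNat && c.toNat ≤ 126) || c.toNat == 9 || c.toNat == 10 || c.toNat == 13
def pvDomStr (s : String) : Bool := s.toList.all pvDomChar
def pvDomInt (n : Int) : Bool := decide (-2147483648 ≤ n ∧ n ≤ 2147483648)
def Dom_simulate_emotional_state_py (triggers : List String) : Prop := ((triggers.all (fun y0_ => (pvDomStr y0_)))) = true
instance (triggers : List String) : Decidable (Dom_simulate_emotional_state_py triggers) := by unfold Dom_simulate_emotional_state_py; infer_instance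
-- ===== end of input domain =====

-- B makes one pass over triggers collecting matched category labels in a set, then resolves by category priority; return value only, same results as A.
-- ===== PORT A =====
def simulate_emotional_state_py (triggers : List String) : String :=
  if triggers.isEmpty then "neutral"
  else if triggers.any (fun t => PySem.Str.isIn "money" t || PySem.Str.isIn "financial" t) then "anxious"
  else if triggers.any (fun t => PySem.Str.isIn "social" t || PySem.Str.isIn "rejection" t) then "conflicted"
  else if triggers.any (fun t => PySem.Str.isIn "family" t || PySem.Str.isIn "approval" t) then "motivated"
  else "engaged"

-- ===== PORT B =====
def pvRules : List (String × List String) :=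
  [("anxious", ["money", "financial"]),
   ("conflicted", ["social", "rejection"]),
   ("motivated", ["family", "approval"])]

def pvKwMatch (kws : List String) (t : String) : Bool :=
  kws.any (fun kw => PySem.Str.isIn kw t)

def pvStep (s : PySem.Set String) (t : String) : PySem.Set String :=
  pvRules.foldl (fun s r => if pvKwMatch r.2 t then PySem.Set.add s r.1 else s) s

def simulate_emotional_state_py_alt (triggers : List String) : String :=
  let matched := triggers.foldl pvStep PySem.Set.empty
  if triggers.isEmpty then "neutral"
  else
    match ["anxious", "conflicted", "motivated"].find? (fun l => PySem.Set.contains matched l) with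
    | some l => l
    | none => "engaged"

-- ===== PRECONDITION & SPEC =====
def Spec_simulate_emotional_state_py (triggers : List String) (out : String) : Prop := out = simulate_emotional_state_py_alt triggers
instance (triggers : List String) (out : String) : Decidable (Spec_simulate_emotional_state_py triggers out) := by unfold Spec_simulate_emotional_state_py; infer_instance

-- ===== CLAIM (what is proved, stated in full; the proofs are below) =====
def Claim_equal_simulate_emotional_state_py : Prop := ∀ (triggers : List String), Dom_simulate_emotional_state_py triggers → Spec_simulate_emotional_state_py triggers (simulate_emotional_state_py triggers)

-- ===== LEMMAS AND PROOFS =====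

lemma pv_beq_decide (a b : String) : (a == b) = decide (a = b) := by
  by_cases h : a = b <;> simp [h]

lemma pv_contains_step (s : PySem.Set String) (t l : String) :
    PySem.Set.contains (pvStep s t) l =
      (PySem.Set.contains s l ||
        ((l == "anxious" && pvKwMatch ["money", "financial"] t) ||
         (l == "conflicted" && pvKwMatch ["social", "rejection"] t) ||
         (l == "motivated" && pvKwMatch ["family", "approval"] t))) := by
  unfold pvStep pvRules
  simp only [List.foldl]
  split_ifs with h1 h2 h3 <;> simp_all [Bool.or_assoc, pv_beq_decide]

lemma pv_contains_foldl (triggers : List String) (s : PySem.Set String) (l : String) :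
    PySem.Set.contains (triggers.foldl pvStep s) l =
      (PySem.Set.contains s l ||
        triggers.any (fun t =>
          (l == "anxious" && pvKwMatch ["money", "financial"] t) ||
          (l == "conflicted" && pvKwMatch ["social", "rejection"] t) ||
          (l == "motivated" && pvKwMatch ["family", "approval"] t))) := by
  induction triggers generalizing s with
  | nil => simp
  | cons t ts ih =>
    rw [List.foldl_cons, ih, pv_contains_step, List.any_cons, Bool.or_assoc]

lemma pv_alt_eq (triggers : List String) :
    simulate_emotional_state_py_alt triggers = simulate_emotional_state_py triggers := by
  have ha : PySem.Set.contains (triggers.foldl pvStep PySem.Set.empty) "anxious"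
      = triggers.any (fun t => PySem.Str.isIn "money" t || PySem.Str.isIn "financial" t) := by
    rw [pv_contains_foldl]; simp [PySem.Set.empty, pvKwMatch]
  have hb : PySem.Set.contains (triggers.foldl pvStep PySem.Set.empty) "conflicted"
      = triggers.any (fun t => PySem.Str.isIn "social" t || PySem.Str.isIn "rejection" t) := by
    rw [pv_contains_foldl]; simp [PySem.Set.empty, pvKwMatch]
  have hc : PySem.Set.contains (triggers.foldl pvStep PySem.Set.empty) "motivated"
      = triggers.any (fun t => PySem.Str.isIn "family" t || PySem.Str.isIn "approval" t) := by
    rw [pv_contains_foldl]; simp [PySem.Set.empty, pvKwMatch]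
  unfold simulate_emotional_state_py_alt simulate_emotional_state_py
  simp only [List.find?, ha, hb, hc]
  cases triggers.isEmpty <;>
    cases triggers.any (fun t => PySem.Str.isIn "money" t || PySem.Str.isIn "financial" t) <;>
    cases triggers.any (fun t => PySem.Str.isIn "social" t || PySem.Str.isIn "rejection" t) <;>
    cases triggers.any (fun t => PySem.Str.isIn "family" t || PySem.Str.isIn "approval" t) <;>
    rfl

-- ===== VERDICT (by name: the statement is the Claim_ definition above) =====
theorem simulate_emotional_state_py_spec : Claim_equal_simulate_emotional_state_py := by
  intro triggers _
  unfold Spec_simulate_emotional_state_py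
  exact (pv_alt_eq triggers).symm
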